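-- pv_equiv track=rewrite | github.com/nlscng/ubiquitous-octo-robot | mock-session/pramp-24/DroneFlightBatteryPlanner.py | calc_drone_min_energy
-- ===== SOURCE A (Python) =====
-- def calc_drone_min_energy(route):
--     # sanity check
--
--     res = 0
--     min_res = 0
--
--     zs = [z for [x, y, z] in route]
--
--     for i in range(1, len(zs)):
--         delta = zs[i - 1] - zs[i]
--         res += delta
--         if res < 0:
--             min_res = min(min_res, res)
--
--     return -min_res
-- ===== SOURCE B (Python) =====
-- def calc_drone_min_energy(route):
--     zs = [z for [x, y, z] in route]
--     if not zs:
--         return 0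
--     return max(0, max(zs) - zs[0])
-- ===== Notes on version B (the rewrite author's own statement) =====
-- stated objective: simpler
-- what changed: Replaces the running-sum-of-deltas loop with the closed form max(0, max(zs) - zs[0]): the prefix sum telescopes to zs[0]-zs[i], so the minimum running sum is determined by the maximum altitude.
import Mathlib
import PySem

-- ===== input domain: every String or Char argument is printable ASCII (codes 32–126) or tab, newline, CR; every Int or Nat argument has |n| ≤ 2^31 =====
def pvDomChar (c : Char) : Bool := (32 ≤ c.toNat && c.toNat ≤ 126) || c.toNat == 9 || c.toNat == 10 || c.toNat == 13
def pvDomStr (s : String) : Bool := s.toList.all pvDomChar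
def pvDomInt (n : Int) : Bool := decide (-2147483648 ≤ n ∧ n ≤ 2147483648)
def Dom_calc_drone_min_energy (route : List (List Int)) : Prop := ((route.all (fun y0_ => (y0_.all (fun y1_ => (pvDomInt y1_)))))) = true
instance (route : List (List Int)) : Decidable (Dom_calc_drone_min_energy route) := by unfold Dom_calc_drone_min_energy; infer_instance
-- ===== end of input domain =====

-- B replaces A's running-sum-of-deltas loop with the closed form max(0, max(zs) - zs[0]); objective: simpler.


-- ===== PORT A =====
-- A's loop over range(1, len(zs)) keeps (res, min_res); transliterated as recursion over the
-- remaining altitudes with the previous altitude threaded (delta = zs[i-1] - zs[i]).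
def pvALoop (prev res min_res : Int) : List Int → Int × Int
  | [] => (res, min_res)
  | z :: rest =>
      let delta := prev - z
      let res' := res + delta
      let min' := if res' < 0 then min min_res res' else min_res
      pvALoop z res' min' rest

def calc_drone_min_energy (route : List (List Int)) : Int :=
  -- [z for [x, y, z] in route]; Pre_ guarantees each triple has length 3
  let zs := route.map (fun r => (PySem.List.pyGet? r 2).getD 0)
  match zs with
  | [] => -(0 : Int)
  | z0 :: rest => -(pvALoop z0 0 0 rest).2

-- ===== PORT B =====
def calc_drone_min_energy_alt (route : List (List Int)) : Int :=
  let zs := route.map (fun r => (PySem.List.pyGet? r 2).getD 0)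
  match zs with
  | [] => 0
  | z0 :: rest => max 0 (rest.foldl max z0 - z0)

-- ===== PRECONDITION & SPEC =====
-- Pre_ excludes exactly the inputs where A raises: the [x, y, z] unpacking raises ValueError
-- on any inner list whose length is not 3 (B's identical comprehension raises there too).
def Pre_calc_drone_min_energy (route : List (List Int)) : Prop :=
  ∀ r ∈ route, r.length = 3
instance (route : List (List Int)) : Decidable (Pre_calc_drone_min_energy route) := by
  unfold Pre_calc_drone_min_energy; infer_instance
def pvWitness_calc_drone_min_energy : List (List Int) := [[0, 0, 1], [1, 1, 3], [2, 2, 0]]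

def Spec_calc_drone_min_energy (route : List (List Int)) (out : Int) : Prop := out = calc_drone_min_energy_alt route
instance (route : List (List Int)) (out : Int) : Decidable (Spec_calc_drone_min_energy route out) := by unfold Spec_calc_drone_min_energy; infer_instance

-- ===== CLAIM (what is proved, stated in full; the proofs are below) =====
def Claim_equal_calc_drone_min_energy : Prop := ∀ (route : List (List Int)), Dom_calc_drone_min_energy route → Pre_calc_drone_min_energy route → Spec_calc_drone_min_energy route (calc_drone_min_energy route)

-- ===== LEMMAS AND PROOFS =====

-- The loop's min_res accumulator: with min_res ≤ 0 the conditional update equals an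
-- unconditional min, and the telescoping res = res + prev - z makes it a fold of mins.
theorem pvALoop_snd (l : List Int) : ∀ (prev res mr : Int), mr ≤ 0 →
    (pvALoop prev res mr l).2 = l.foldl (fun m z => min m (res + prev - z)) mr := by
  induction l with
  | nil => intro prev res mr _; simp [pvALoop]
  | cons z rest ih =>
      intro prev res mr hmr
      have hupd : (if res + (prev - z) < 0 then min mr (res + (prev - z)) else mr)
          = min mr (res + (prev - z)) := by
        split_ifs with h
        · rfl
        · omega
      simp only [pvALoop, hupd]
      rw [ih z (res + (prev - z)) (min mr (res + (prev - z))) (by omega)]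
      simp only [List.foldl_cons]
      have hf : (fun (m w : Int) => min m (res + (prev - z) + z - w))
          = (fun (m w : Int) => min m (res + prev - w)) := by
        funext m w; congr 1; omega
      have hi : min mr (res + (prev - z)) = min mr (res + prev - z) := by omega
      rw [hf, hi]

-- fold of mins of (z0 - z) versus fold of max.
theorem pv_min_max (z0 : Int) (l : List Int) : ∀ (m M init : Int), init = min m (z0 - M) →
    l.foldl (fun a z => min a (z0 - z)) init = min m (z0 - l.foldl max M) := by
  induction l with
  | nil => intro m M init h; simpa using h
  | cons z rest ih =>
      intro m M init h
      simp only [List.foldl_cons]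
      exact ih m (max M z) (min init (z0 - z)) (by omega)

-- ===== VERDICT (by name: the statement is the Claim_ definition above) =====
theorem calc_drone_min_energy_spec : Claim_equal_calc_drone_min_energy := by
  intro route _ _
  unfold Spec_calc_drone_min_energy calc_drone_min_energy calc_drone_min_energy_alt
  cases h : route.map (fun r => (PySem.List.pyGet? r 2).getD 0) with
  | nil => simp
  | cons z0 rest =>
      simp only []
      rw [pvALoop_snd rest z0 0 0 le_rfl]
      have hf : (fun (m z : Int) => min m (0 + z0 - z)) = (fun (m z : Int) => min m (z0 - z)) := by
        funext m z; congr 1; omega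
      rw [hf, pv_min_max z0 rest 0 z0 0 (by omega)]
      omega
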